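-- pv_equiv track=rewrite | github.com/prise-3d/pbrt_launch | launch_pbrt.py | remove_lines_starting_with
-- ===== SOURCE A (Python) =====
-- def remove_lines_starting_with(text, start_string):
--     lines = text.splitlines()
--     result_lines = []
--     remove_next_lines = False
--
--     for line in lines:
--         if line.strip().startswith(start_string):
--             # Set the flag to remove following lines
--             remove_next_lines = True
--         elif remove_next_lines and (line.startswith(" ") or line.startswith("\t")):
--             # Skip lines beginning with space or tab
--             continue
--         else:
--             # Add the line to the result if it's not to be removed
--             result_lines.append(line)
--             # Reset the flag if a new line is encountered
--             remove_next_lines = False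
--
--     # Join the result lines into a new text
--     result_text = '\n'.join(result_lines)
--     return result_text
-- ===== SOURCE B (Python) =====
-- def remove_lines_starting_with(text, start_string):
--     lines = text.splitlines()
--     result_lines = []
--     i = 0
--     n = len(lines)
--     while i < n:
--         line = lines[i]
--         if line.strip().startswith(start_string):
--             # skip the marker line, then consume its indented continuations;
--             # stop early so a matching indented line is reprocessed as a marker
--             i += 1
--             while i < n and (lines[i].startswith(" ") or lines[i].startswith("\t")) \
--                     and not lines[i].strip().startswith(start_string):
--                 i += 1
--         else:
--             result_lines.append(line)
--             i += 1
--     return '\n'.join(result_lines)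
-- ===== Notes on version B (the rewrite author's own statement) =====
-- stated objective: alternative
-- what changed: Replaces A's single pass with a remove_next_lines flag by an explicit index loop whose inner while consumes the indented continuations of each matching line directly, stopping early so a matching indented line is reprocessed as a marker.
import Mathlib
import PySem

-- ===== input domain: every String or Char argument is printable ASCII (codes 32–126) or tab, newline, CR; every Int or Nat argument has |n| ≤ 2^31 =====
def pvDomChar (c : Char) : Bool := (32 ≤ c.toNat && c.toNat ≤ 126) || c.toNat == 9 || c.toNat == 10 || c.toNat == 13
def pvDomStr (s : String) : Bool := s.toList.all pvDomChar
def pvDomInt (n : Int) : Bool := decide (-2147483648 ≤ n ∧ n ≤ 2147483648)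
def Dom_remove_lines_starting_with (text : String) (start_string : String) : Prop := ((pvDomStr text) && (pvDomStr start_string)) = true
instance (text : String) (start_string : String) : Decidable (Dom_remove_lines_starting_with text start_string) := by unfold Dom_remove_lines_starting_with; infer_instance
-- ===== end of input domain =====

-- B replaces A's remove_next_lines flag by an index loop with an inner skip loop (different decomposition, same cost).

-- ===== PORT A =====
def remove_lines_starting_with (text : String) (start_string : String) : String :=
  let lines := PySem.Str.splitlines text
  let st := lines.foldl (fun (s : List String × Bool) line =>
    if PySem.Str.startswith (PySem.Str.strip line) start_string then
      (s.1, true)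
    else if s.2 && (PySem.Str.startswith line " " || PySem.Str.startswith line "\t") then
      s
    else
      (s.1 ++ [line], false)) ([], false)
  PySem.Str.join "\n" st.1

-- ===== PORT B =====
-- B's inner while loop: skip indented lines that do not themselves match start_string
def pvSkipIndented (ss : String) : List String → List String
  | [] => []
  | l :: rest =>
    if (PySem.Str.startswith l " " || PySem.Str.startswith l "\t")
        && !(PySem.Str.startswith (PySem.Str.strip l) ss) then
      pvSkipIndented ss rest
    else
      l :: rest

theorem pvSkipIndented_length_le (ss : String) (xs : List String) :
    (pvSkipIndented ss xs).length ≤ xs.length := by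
  induction xs with
  | nil => simp [pvSkipIndented]
  | cons l rest ih =>
    simp only [pvSkipIndented]
    split
    · exact Nat.le_succ_of_le ih
    · simp

-- B's outer while loop
def pvGoB (ss : String) : List String → List String
  | [] => []
  | l :: rest =>
    if PySem.Str.startswith (PySem.Str.strip l) ss then
      pvGoB ss (pvSkipIndented ss rest)
    else
      l :: pvGoB ss rest
termination_by xs => xs.length
decreasing_by
  · exact Nat.lt_succ_of_le (pvSkipIndented_length_le ss rest)
  · simp

def remove_lines_starting_with_alt (text : String) (start_string : String) : String :=
  PySem.Str.join "\n" (pvGoB start_string (PySem.Str.splitlines text))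

-- ===== PRECONDITION & SPEC =====
def Spec_remove_lines_starting_with (text : String) (start_string : String) (out : String) : Prop := out = remove_lines_starting_with_alt text start_string
instance (text : String) (start_string : String) (out : String) : Decidable (Spec_remove_lines_starting_with text start_string out) := by unfold Spec_remove_lines_starting_with; infer_instance

-- ===== CLAIM (what is proved, stated in full; the proofs are below) =====
def Claim_equal_remove_lines_starting_with : Prop := ∀ (text : String) (start_string : String), Dom_remove_lines_starting_with text start_string → Spec_remove_lines_starting_with text start_string (remove_lines_starting_with text start_string)

-- ===== LEMMAS AND PROOFS =====

-- Loop invariant: A's fold from state (acc, flag) produces acc ++ B's output,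
-- where flag = true corresponds to B being inside its skipping phase.
theorem pvSkip_cons_drop (ss l : String) (rest : List String)
    (hi : (PySem.Str.startswith l " " || PySem.Str.startswith l "\t") = true)
    (hm : PySem.Str.startswith (PySem.Str.strip l) ss = false) :
    pvSkipIndented ss (l :: rest) = pvSkipIndented ss rest := by
  rw [pvSkipIndented, hi, hm]; rfl

theorem pvSkip_cons_keep_marker (ss l : String) (rest : List String)
    (hm : PySem.Str.startswith (PySem.Str.strip l) ss = true) :
    pvSkipIndented ss (l :: rest) = l :: rest := by
  rw [pvSkipIndented, hm]; simp

theorem pvSkip_cons_keep_flat (ss l : String) (rest : List String)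
    (hi : (PySem.Str.startswith l " " || PySem.Str.startswith l "\t") = false) :
    pvSkipIndented ss (l :: rest) = l :: rest := by
  rw [pvSkipIndented, hi]; rfl

theorem pvGoB_nil (ss : String) : pvGoB ss [] = [] := by rw [pvGoB]

theorem pvGoB_cons_marker (ss l : String) (rest : List String)
    (hm : PySem.Str.startswith (PySem.Str.strip l) ss = true) :
    pvGoB ss (l :: rest) = pvGoB ss (pvSkipIndented ss rest) := by
  rw [pvGoB, hm]; rfl

theorem pvGoB_cons_other (ss l : String) (rest : List String)
    (hm : PySem.Str.startswith (PySem.Str.strip l) ss = false) :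
    pvGoB ss (l :: rest) = l :: pvGoB ss rest := by
  rw [pvGoB, hm]; rfl

theorem pvLoop_eq (ss : String) (lines : List String) :
    ∀ (acc : List String) (flag : Bool),
    (lines.foldl (fun (s : List String × Bool) line =>
      if PySem.Str.startswith (PySem.Str.strip line) ss then
        (s.1, true)
      else if s.2 && (PySem.Str.startswith line " " || PySem.Str.startswith line "\t") then
        s
      else
        (s.1 ++ [line], false)) (acc, flag)).1
      = acc ++ (if flag then pvGoB ss (pvSkipIndented ss lines) else pvGoB ss lines) := by
  induction lines with
  | nil => intro acc flag; cases flag <;> simp [pvGoB_nil, pvSkipIndented]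
  | cons l rest ih =>
    intro acc flag
    by_cases hm : PySem.Str.startswith (PySem.Str.strip l) ss = true
    · -- marker line: A sets the flag; B skips it (in both phases)
      rw [List.foldl_cons]
      simp only [hm, if_pos, ih]
      cases flag
      · rw [pvGoB_cons_marker ss l rest hm]; simp
      · rw [pvSkip_cons_keep_marker ss l rest hm, pvGoB_cons_marker ss l rest hm]; simp
    · rw [Bool.not_eq_true] at hm
      by_cases hi : (PySem.Str.startswith l " " || PySem.Str.startswith l "\t") = true
      · cases flag with
        | false =>
          rw [List.foldl_cons]
          simp only [hm, Bool.false_eq_true, if_false, Bool.false_and, ih]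
          rw [pvGoB_cons_other ss l rest hm]; simp
        | true =>
          -- indented continuation: A skips, B's inner loop drops it
          rw [List.foldl_cons]
          simp only [hm, Bool.false_eq_true, if_false, Bool.true_and, hi, if_true, ih]
          rw [pvSkip_cons_drop ss l rest hi hm]
      · rw [Bool.not_eq_true] at hi
        -- ordinary line: both emit it and leave the skipping phase
        rw [List.foldl_cons]
        simp only [hm, Bool.false_eq_true, if_false, hi, Bool.and_false, ih]
        cases flag
        · rw [pvGoB_cons_other ss l rest hm]; simp
        · rw [pvSkip_cons_keep_flat ss l rest hi, pvGoB_cons_other ss l rest hm]; simp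

-- ===== VERDICT (by name: the statement is the Claim_ definition above) =====
theorem remove_lines_starting_with_spec : Claim_equal_remove_lines_starting_with := by
  intro text start_string _
  unfold Spec_remove_lines_starting_with remove_lines_starting_with remove_lines_starting_with_alt
  simp only [pvLoop_eq start_string (PySem.Str.splitlines text) [] false]
  simp
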